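-- pv_equiv track=rewrite | github.com/carloscongrains/Pseudogene_finder | pseudogene_finder.py | get_pos_len
-- ===== SOURCE A (Python) =====
-- def get_pos_len(indels_list,indels_dict):
--     if not indels_list:
--         return {}
--
--     start_of_sequence = indels_list[0]
--     current_length = 1
--
--     # Iterate through the list starting from the second element
--     for i in range(1, len(indels_list)):
--         # Check if the current number is consecutive to the previous one
--         if indels_list[i] == indels_list[i-1] + 1:
--             current_length += 1
--         else:
--             # If not consecutive, store the previous sequence and reset
--             indels_dict[start_of_sequence] = current_length
--             start_of_sequence = indels_list[i]
--             current_length = 1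
--
--     # Add the last sequence to the result after the loop ends
--     indels_dict[start_of_sequence] = current_length
--
--     return indels_dict
-- ===== SOURCE B (Python) =====
-- def get_pos_len(indels_list, indels_dict):
--     if not indels_list:
--         return {}
--     # Build the run list back-to-front: walk the list reversed, keeping the runs
--     # in reverse order (current run last), extending it or opening a new one.
--     runs = []
--     for x in reversed(indels_list):
--         if runs and runs[-1][0] == x + 1:
--             runs[-1] = (x, runs[-1][1] + 1)
--         else:
--             runs.append((x, 1))
--     for start, length in reversed(runs):
--         indels_dict[start] = length
--     return indels_dict
-- ===== Notes on version B (the rewrite author's own statement) =====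
-- stated objective: alternative
-- what changed: Instead of streaming running start/length counters and writing completed runs into the dict inside the scan, B builds the explicit list of (start, length) runs back-to-front from a reversed pass and then bulk-inserts the runs into the dict.
import Mathlib
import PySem

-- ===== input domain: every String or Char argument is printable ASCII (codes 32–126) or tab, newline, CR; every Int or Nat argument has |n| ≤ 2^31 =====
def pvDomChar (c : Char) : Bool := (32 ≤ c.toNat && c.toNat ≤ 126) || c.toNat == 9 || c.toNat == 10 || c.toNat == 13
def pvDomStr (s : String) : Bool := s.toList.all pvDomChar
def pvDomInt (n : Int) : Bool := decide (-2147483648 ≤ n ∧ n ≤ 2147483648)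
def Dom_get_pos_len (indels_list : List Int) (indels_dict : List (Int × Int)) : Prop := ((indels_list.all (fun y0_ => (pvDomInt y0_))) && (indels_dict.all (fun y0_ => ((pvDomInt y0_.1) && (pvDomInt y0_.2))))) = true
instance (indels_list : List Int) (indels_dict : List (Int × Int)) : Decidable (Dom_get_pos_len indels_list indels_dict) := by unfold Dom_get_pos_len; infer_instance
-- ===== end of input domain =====

-- B builds the explicit (start, length) run list back-to-front from a reversed pass and then
-- bulk-inserts it into the dict, instead of A's streaming counters with inline dict writes
-- (alternative decomposition, same cost). Both Pythons mutate indels_dict identically on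
-- non-empty input; the equivalence proved here is about the returned value.

-- ===== PORT A =====
def get_pos_len (indels_list : List Int) (indels_dict : List (Int × Int)) : List (Int × Int) :=
  if indels_list.isEmpty then []
  else
    let st := (PySem.List.pyRange 1 (PySem.List.len indels_list) 1).foldl
      (fun (s : Int × Int × PySem.Dict Int Int) i =>
        if PySem.List.pyGetD indels_list i 0 = PySem.List.pyGetD indels_list (i - 1) 0 + 1 then
          (s.1, s.2.1 + 1, s.2.2)
        else
          (PySem.List.pyGetD indels_list i 0, 1, s.2.2.insert s.1 s.2.1))
      (PySem.List.pyGetD indels_list 0 0, 1, PySem.Dict.mk indels_dict)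
    (st.2.2.insert st.1 st.2.1).items

-- ===== PORT B =====
-- B-side helper: the body of Source B's first loop ('runs[-1] = …' is the in-place
-- update of the last element, i.e. dropLast ++ [new last])
def bRunStep (rs : List (Int × Int)) (x : Int) : List (Int × Int) :=
  match rs.getLast? with
  | some (s, k) => if s = x + 1 then rs.dropLast ++ [(x, k + 1)] else rs ++ [(x, 1)]
  | none => rs ++ [(x, 1)]

def get_pos_len_alt (indels_list : List Int) (indels_dict : List (Int × Int)) : List (Int × Int) :=
  if indels_list.isEmpty then []
  else
    -- 'for x in reversed(indels_list)': a fold over the reversed list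
    let runs := indels_list.reverse.foldl bRunStep ([] : List (Int × Int))
    -- 'for start, length in reversed(runs)'
    (runs.reverse.foldl (fun (d : PySem.Dict Int Int) p => d.insert p.1 p.2)
      (PySem.Dict.mk indels_dict)).items

-- ===== PRECONDITION & SPEC =====
def Spec_get_pos_len (indels_list : List Int) (indels_dict : List (Int × Int)) (out : List (Int × Int)) : Prop := out = get_pos_len_alt indels_list indels_dict
instance (indels_list : List Int) (indels_dict : List (Int × Int)) (out : List (Int × Int)) : Decidable (Spec_get_pos_len indels_list indels_dict out) := by unfold Spec_get_pos_len; infer_instance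

-- ===== CLAIM (what is proved, stated in full; the proofs are below) =====
def Claim_equal_get_pos_len : Prop := ∀ (indels_list : List Int) (indels_dict : List (Int × Int)), Dom_get_pos_len indels_list indels_dict → Spec_get_pos_len indels_list indels_dict (get_pos_len indels_list indels_dict)

-- ===== LEMMAS AND PROOFS =====

-- left-to-right normal form of the run decomposition, shared by both ports:
-- the runs of `t` continuing a current run (start `s`, length `c`) whose last element was `prev`
def runsL (prev s c : Int) : List Int → List (Int × Int)
  | [] => [(s, c)]
  | x :: t => if x = prev + 1 then runsL x s (c + 1) t else (s, c) :: runsL x x 1 t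

def runLen (prev : Int) : List Int → Int
  | [] => 0
  | x :: t => if x = prev + 1 then 1 + runLen x t else 0

def runRest (prev : Int) : List Int → List (Int × Int)
  | [] => []
  | x :: t => if x = prev + 1 then runRest x t else runsL x x 1 t

-- only the head of runsL depends on s and c, and on c only by a shift
lemma runsL_eq (t : List Int) : ∀ prev s c : Int,
    runsL prev s c t = (s, c + runLen prev t) :: runRest prev t := by
  induction t with
  | nil => intro prev s c; simp [runsL, runLen, runRest]
  | cons x t ih =>
    intro prev s c
    simp only [runsL, runLen, runRest]
    by_cases h : x = prev + 1
    · rw [if_pos h, if_pos h, if_pos h, ih x s (c + 1),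
        show c + 1 + runLen x t = c + (1 + runLen x t) from by ring]
    · rw [if_neg h, if_neg h, if_neg h, show c + (0 : Int) = c from by ring]

-- index shift: A's fold over range(2, len(a::l)) on a::l is its fold over range(1, len(l)) on l
lemma shift_fold (a : Int) (l : List Int) (z : Int × Int × PySem.Dict Int Int) :
    (PySem.List.pyRange 2 (PySem.List.len (a :: l)) 1).foldl
      (fun z i =>
        if PySem.List.pyGetD (a :: l) i 0 = PySem.List.pyGetD (a :: l) (i - 1) 0 + 1 then
          (z.1, z.2.1 + 1, z.2.2)
        else (PySem.List.pyGetD (a :: l) i 0, 1, z.2.2.insert z.1 z.2.1)) z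
    = (PySem.List.pyRange 1 (PySem.List.len l) 1).foldl
      (fun z i =>
        if PySem.List.pyGetD l i 0 = PySem.List.pyGetD l (i - 1) 0 + 1 then
          (z.1, z.2.1 + 1, z.2.2)
        else (PySem.List.pyGetD l i 0, 1, z.2.2.insert z.1 z.2.1)) z := by
  rw [PySem.List.pyRange_one, PySem.List.pyRange_one, List.foldl_map, List.foldl_map]
  have hn : (PySem.List.len (a :: l) - 2).toNat = (PySem.List.len l - 1).toNat := by
    simp [PySem.List.len_eq]; omega
  rw [hn]
  apply PySem.List.foldl_congr_mem
  intro z m _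
  have h1 : (2 : Int) + (m : Int) - 1 = ((m + 1 : Nat) : Int) := by push_cast; ring
  have h2 : (2 : Int) + (m : Int) = ((m + 2 : Nat) : Int) := by push_cast; ring
  have h3 : (1 : Int) + (m : Int) - 1 = ((m : Nat) : Int) := by omega
  have h4 : (1 : Int) + (m : Int) = ((m + 1 : Nat) : Int) := by push_cast; ring
  rw [h1, h2, h3, h4, PySem.List.pyGetD_natCast, PySem.List.pyGetD_natCast,
    PySem.List.pyGetD_natCast, PySem.List.pyGetD_natCast]
  simp [List.getD]

-- A's indexed fold is the fold over adjacent pairs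
lemma fold_pairs :
    ∀ (l : List Int) (z : Int × Int × PySem.Dict Int Int),
    (PySem.List.pyRange 1 (PySem.List.len l) 1).foldl
      (fun z i =>
        if PySem.List.pyGetD l i 0 = PySem.List.pyGetD l (i - 1) 0 + 1 then
          (z.1, z.2.1 + 1, z.2.2)
        else (PySem.List.pyGetD l i 0, 1, z.2.2.insert z.1 z.2.1)) z
    = (l.zip l.tail).foldl
      (fun z p =>
        if p.2 = p.1 + 1 then (z.1, z.2.1 + 1, z.2.2)
        else (p.2, 1, z.2.2.insert z.1 z.2.1)) z := by
  intro l
  induction l with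
  | nil =>
    intro z
    simp [PySem.List.len_eq, PySem.List.pyRange_one_eq_nil]
  | cons a l ih =>
    intro z
    cases l with
    | nil => simp [PySem.List.len_eq, PySem.List.pyRange_one_eq_nil]
    | cons b t =>
      have h1 : (1 : Int) < PySem.List.len (a :: b :: t) := by
        simp only [PySem.List.len_eq, List.length_cons]; omega
      rw [PySem.List.pyRange_one_cons h1]
      simp only [List.foldl_cons, List.zip_cons_cons, List.tail_cons]
      have ha : PySem.List.pyGetD (a :: b :: t) ((1 : Int) - 1) 0 = a := by
        rw [show (1 : Int) - 1 = ((0 : Nat) : Int) from by norm_num, PySem.List.pyGetD_natCast]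
        rfl
      have hb : PySem.List.pyGetD (a :: b :: t) (1 : Int) 0 = b := by
        rw [show (1 : Int) = ((1 : Nat) : Int) from by norm_num, PySem.List.pyGetD_natCast]
        rfl
      rw [ha, hb, show (1 : Int) + 1 = 2 from rfl, shift_fold a (b :: t)]
      exact ih _

-- A's whole computation in terms of runsL
lemma zip_fold_runsL (t : List Int) : ∀ (a s c : Int) (d : PySem.Dict Int Int),
    (((a :: t).zip t).foldl
        (fun (z : Int × Int × PySem.Dict Int Int) p =>
          if p.2 = p.1 + 1 then (z.1, z.2.1 + 1, z.2.2)
          else (p.2, 1, z.2.2.insert z.1 z.2.1)) (s, c, d)).2.2.insert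
      (((a :: t).zip t).foldl
        (fun (z : Int × Int × PySem.Dict Int Int) p =>
          if p.2 = p.1 + 1 then (z.1, z.2.1 + 1, z.2.2)
          else (p.2, 1, z.2.2.insert z.1 z.2.1)) (s, c, d)).1
      (((a :: t).zip t).foldl
        (fun (z : Int × Int × PySem.Dict Int Int) p =>
          if p.2 = p.1 + 1 then (z.1, z.2.1 + 1, z.2.2)
          else (p.2, 1, z.2.2.insert z.1 z.2.1)) (s, c, d)).2.1
    = (runsL a s c t).foldl (fun d p => d.insert p.1 p.2) d := by
  induction t with
  | nil => intro a s c d; simp [runsL]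
  | cons b t ih =>
    intro a s c d
    simp only [List.zip_cons_cons, List.foldl_cons, runsL]
    by_cases h : b = a + 1
    · rw [if_pos h, if_pos h]
      exact ih b s (c + 1) d
    · rw [if_neg h, if_neg h]
      simp only [List.foldl_cons]
      exact ih b b 1 (d.insert s c)

-- one step of Source B's first loop, seen on the reversed (front-form) run list
lemma step_rev (rs : List (Int × Int)) (x : Int) :
    bRunStep rs x
    = (match rs.reverse with
       | (s, k) :: t => if s = x + 1 then (x, k + 1) :: t else (x, 1) :: (s, k) :: t
       | [] => [(x, 1)]).reverse := by
  rcases List.eq_nil_or_concat rs with h | ⟨ys, e, h⟩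
  · subst h; simp [bRunStep]
  · obtain ⟨s, k⟩ := e
    subst h
    by_cases hs : s = x + 1 <;>
      simp [bRunStep, List.reverse_append, hs]

-- Source B's first loop builds the reverse of the front-form run list
lemma runsRev_eq (l : List Int) : ∀ acc : List (Int × Int),
    l.foldr (fun x rs => bRunStep rs x) acc
    = (l.foldr
        (fun x rs =>
          match rs with
          | (s, k) :: t => if s = x + 1 then (x, k + 1) :: t else (x, 1) :: (s, k) :: t
          | [] => [(x, 1)])
        acc.reverse).reverse := by
  induction l with
  | nil => intro acc; simp
  | cons b l ih =>
    intro acc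
    simp only [List.foldr_cons]
    rw [ih acc, step_rev]
    simp

-- the front-form run list computes runsL
lemma foldr_runsL : ∀ (t : List Int) (a : Int),
    (a :: t).foldr
      (fun x rs =>
        match rs with
        | (s, k) :: t => if s = x + 1 then (x, k + 1) :: t else (x, 1) :: (s, k) :: t
        | [] => [(x, 1)])
      ([] : List (Int × Int)) = runsL a a 1 t := by
  intro t
  induction t with
  | nil => intro a; simp [runsL]
  | cons b t ih =>
    intro a
    simp only [List.foldr_cons] at ih ⊢
    rw [ih b, runsL_eq t b b 1]
    simp only [runsL]
    by_cases h : b = a + 1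
    · rw [if_pos h, if_pos h, runsL_eq t b a (1 + 1),
        show (1 : Int) + 1 + runLen b t = 1 + runLen b t + 1 from by ring]
    · rw [if_neg h, if_neg h, runsL_eq t b b 1]

-- ===== VERDICT (by name: the statement is the Claim_ definition above) =====
theorem get_pos_len_spec : Claim_equal_get_pos_len := by
  intro l d _
  unfold Spec_get_pos_len
  cases l with
  | nil => rfl
  | cons a t =>
    simp only [get_pos_len, get_pos_len_alt, List.isEmpty_cons, Bool.false_eq_true, if_false]
    have hrev : (a :: t).reverse.foldl bRunStep ([] : List (Int × Int))
        = (a :: t).foldr (fun x rs => bRunStep rs x) ([] : List (Int × Int)) := by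
      rw [List.foldl_reverse]
    rw [hrev, runsRev_eq (a :: t) []]
    simp only [List.reverse_nil, List.reverse_reverse]
    rw [foldr_runsL t a, PySem.List.pyGetD_zero_cons]
    rw [fold_pairs (a :: t) (a, 1, PySem.Dict.mk d)]
    simp only [List.tail_cons]
    rw [zip_fold_runsL t a a 1 (PySem.Dict.mk d)]
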